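-- pv_equiv track=rewrite | github.com/benquick123/code-profiling | code/batch-2/vse-naloge-brez-testov/DN12-M-028.py | koncna_povezava
-- ===== SOURCE A (Python) =====
-- def koncna_povezava(zemljevid):
--     n=1
--     seznam=[]
--     pojavi_enkrat=[]
--     while n in zemljevid:
--         if len(zemljevid[n])==1:
--             seznam.append(n)
--         n=n+1
--     return seznam
-- ===== SOURCE B (Python) =====
-- def koncna_povezava(zemljevid):
--     # Sort the dict's keys; one ascending scan finds the first missing positive
--     # integer m (so 1..m-1 is exactly the consecutive run), then the answer is
--     # the sorted keys inside [1, m) whose value list has exactly one element.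
--     keys = sorted(zemljevid)
--     m = 1
--     for k in keys:
--         if k == m:
--             m = m + 1
--     return [k for k in keys if 1 <= k < m and len(zemljevid[k]) == 1]
-- ===== Notes on version B (the rewrite author's own statement) =====
-- stated objective: alternative
-- what changed: A walks n=1,2,... with repeated dict membership tests, filtering as it goes; B never walks: it sorts the keys, finds the first missing positive integer m by one ascending scan over the sorted keys, and returns the sorted keys in [1,m) with single-element values.
import Mathlib
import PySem

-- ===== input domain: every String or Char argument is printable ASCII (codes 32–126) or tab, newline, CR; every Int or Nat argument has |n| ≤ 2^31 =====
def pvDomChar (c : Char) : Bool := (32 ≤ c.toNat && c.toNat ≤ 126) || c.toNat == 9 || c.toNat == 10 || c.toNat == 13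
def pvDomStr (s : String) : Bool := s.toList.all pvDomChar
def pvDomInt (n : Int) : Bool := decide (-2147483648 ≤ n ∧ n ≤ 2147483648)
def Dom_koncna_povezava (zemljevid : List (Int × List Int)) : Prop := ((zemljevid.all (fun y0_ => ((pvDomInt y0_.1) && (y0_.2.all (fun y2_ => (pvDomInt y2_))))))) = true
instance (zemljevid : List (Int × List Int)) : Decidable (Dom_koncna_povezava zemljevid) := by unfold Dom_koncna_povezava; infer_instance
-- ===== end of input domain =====

-- B replaces A's key-by-key membership walk with a sort-based algorithm: sort the keys,
-- locate the first missing positive integer by one ascending scan, filter the sorted keys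
-- (objective: alternative; same return value, no speed claim).

-- dict lookup (first match in the association list); shared by both ports
def pvLookup (z : List (Int × List Int)) (k : Int) : Option (List Int) :=
  match z with
  | [] => none
  | (a, v) :: rest => if a == k then some v else pvLookup rest k

-- ===== PORT A =====
-- A's while loop: n walks 1,2,… while n is a key, appending n when len(zemljevid[n])==1.
-- The run of consecutive keys starting at 1 has length ≤ z.length, so fuel z.length+1
-- always reaches the terminating membership test; the loop itself is ported step for step.
def koncna_povezava_loopA (z : List (Int × List Int)) (fuel : Nat) (n : Int) (seznam : List Int) : List Int :=
  match fuel with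
  | 0 => seznam
  | f + 1 =>
    match pvLookup z n with
    | none => seznam
    | some v => koncna_povezava_loopA z f (n + 1) (if v.length == 1 then seznam ++ [n] else seznam)

def koncna_povezava (zemljevid : List (Int × List Int)) : List Int :=
  koncna_povezava_loopA zemljevid (zemljevid.length + 1) 1 []

-- ===== PORT B =====
-- B: keys = sorted(zemljevid); m = first missing positive integer, found by the
-- ascending for-loop over keys; result = sorted keys in [1, m) with len(value) == 1.
def koncna_povezava_alt (zemljevid : List (Int × List Int)) : List Int :=
  let keys := PySem.List.sorted (zemljevid.map Prod.fst) (fun x => x) false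
  let m := keys.foldl (fun m k => if k == m then m + 1 else m) (1 : Int)
  keys.filter (fun k => decide (1 ≤ k) && decide (k < m) && (((pvLookup zemljevid k).getD []).length == 1))

-- ===== PRECONDITION & SPEC =====
-- Pre_ only states the dict representation invariant: a Python dict has pairwise-distinct
-- keys, so every input the Python A accepts is admitted; it excludes no Python input.
def Pre_koncna_povezava (zemljevid : List (Int × List Int)) : Prop :=
  (zemljevid.map Prod.fst).Nodup
instance (zemljevid : List (Int × List Int)) : Decidable (Pre_koncna_povezava zemljevid) := by unfold Pre_koncna_povezava; infer_instance

def pvWitness_koncna_povezava : (List (Int × List Int)) := [(1, [5]), (2, [1, 2]), (3, [7])]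

def Spec_koncna_povezava (zemljevid : List (Int × List Int)) (out : List Int) : Prop := out = koncna_povezava_alt zemljevid
instance (zemljevid : List (Int × List Int)) (out : List Int) : Decidable (Spec_koncna_povezava zemljevid out) := by unfold Spec_koncna_povezava; infer_instance

-- ===== CLAIM =====
def Claim_equal_koncna_povezava : Prop := ∀ (zemljevid : List (Int × List Int)), Dom_koncna_povezava zemljevid → Pre_koncna_povezava zemljevid → Spec_koncna_povezava zemljevid (koncna_povezava zemljevid)

-- ===== LEMMAS AND PROOFS =====

lemma lookup_some_iff_mem (z : List (Int × List Int)) (n : Int) :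
    (pvLookup z n ≠ none) ↔ n ∈ z.map Prod.fst := by
  induction z with
  | nil => simp [pvLookup]
  | cons p rest ih =>
    obtain ⟨a, v⟩ := p
    by_cases h : a = n
    · subst h; simp [pvLookup]
    · simp [pvLookup, (by simpa using Ne.symm h : ¬ n = a), (by simpa using h : (a == n) = false), ih]

-- A's loop equals acc ++ filter over the range up to the walk's stopping point
def walkEnd (z : List (Int × List Int)) (fuel : Nat) (n : Int) : Int :=
  match fuel with
  | 0 => n
  | f + 1 =>
    match pvLookup z n with
    | none => n
    | some _ => walkEnd z f (n + 1)

lemma walkEnd_ge (z : List (Int × List Int)) (fuel : Nat) :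
    ∀ n : Int, n ≤ walkEnd z fuel n := by
  induction fuel with
  | zero => intro n; simp [walkEnd]
  | succ f ih =>
    intro n
    simp only [walkEnd]
    cases pvLookup z n with
    | none => exact le_refl n
    | some v => exact le_trans (by omega) (ih (n + 1))

lemma loopA_eq_filter (z : List (Int × List Int)) (cond : Int → Bool)
    (hcond : ∀ k, cond k = (((pvLookup z k).getD []).length == 1)) (fuel : Nat) :
    ∀ (n : Int) (seznam : List Int),
      koncna_povezava_loopA z fuel n seznam =
      seznam ++ (PySem.List.pyRange n (walkEnd z fuel n) 1).filter cond := by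
  induction fuel with
  | zero =>
    intro n seznam
    simp [koncna_povezava_loopA, walkEnd, PySem.List.pyRange_one_eq_nil (le_refl n)]
  | succ f ih =>
    intro n seznam
    simp only [koncna_povezava_loopA, walkEnd]
    cases hlk : pvLookup z n with
    | none => simp [PySem.List.pyRange_one_eq_nil (le_refl n)]
    | some v =>
      have hlt : n < walkEnd z f (n + 1) :=
        lt_of_lt_of_le (by omega) (walkEnd_ge z f (n + 1))
      dsimp only
      rw [ih (n + 1), PySem.List.pyRange_one_cons hlt, List.filter_cons]
      rw [hcond n, hlk]
      simp only [Option.getD_some]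
      by_cases hv : v.length == 1
      · simp [hv, List.append_assoc]
      · simp [hv]

-- the walk's stopping point: not a key, and everything before it (from the start) is a key
lemma walkEnd_spec (z : List (Int × List Int)) :
    ∀ (fuel : Nat) (n : Int),
      ((z.map Prod.fst).filter (fun k => decide (n ≤ k))).length < fuel →
      pvLookup z (walkEnd z fuel n) = none ∧
      ∀ j, n ≤ j → j < walkEnd z fuel n → j ∈ z.map Prod.fst := by
  intro fuel
  induction fuel with
  | zero => intro n h; omega
  | succ f ih =>
    intro n hlen
    simp only [walkEnd]
    cases hlk : pvLookup z n with
    | none =>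
      simp only [hlk]
      refine ⟨trivial, ?_⟩
      intro j h1 h2; omega
    | some v =>
      dsimp only
      have hmem : n ∈ z.map Prod.fst := (lookup_some_iff_mem z n).mp (by simp [hlk])
      -- shrink the fuel bound: the filter for n+1 is strictly shorter than the one for n
      have hsub : ((z.map Prod.fst).filter (fun k => decide (n + 1 ≤ k))).length <
          ((z.map Prod.fst).filter (fun k => decide (n ≤ k))).length := by
        have h1 : ((z.map Prod.fst).filter (fun k => decide (n + 1 ≤ k))).length =
            (((z.map Prod.fst).filter (fun k => decide (n ≤ k))).filter (fun k => decide (n + 1 ≤ k))).length := by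
          rw [List.filter_filter]
          congr 1
          apply List.filter_congr
          intro x _
          by_cases hx : n + 1 ≤ x
          · have hx' : n ≤ x := by omega
            simp [hx, hx']
          · simp [hx]
        rw [h1]
        apply List.length_filter_lt_length_iff_exists.mpr
        refine ⟨n, ?_, by simp⟩
        simp [hmem]
      have := ih (n + 1) (by omega)
      refine ⟨this.1, ?_⟩
      intro j h1 h2
      by_cases hj : j = n
      · subst hj; exact hmem
      · exact this.2 j (by omega) h2

-- the ascending scan over a strictly increasing key list finds the first missing value
lemma scan_spec (L : List Int) (hL : L.Pairwise (· < ·)) :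
    ∀ m0 : Int,
      m0 ≤ L.foldl (fun m k => if k == m then m + 1 else m) m0 ∧
      L.foldl (fun m k => if k == m then m + 1 else m) m0 ∉ L ∧
      ∀ j, m0 ≤ j → j < L.foldl (fun m k => if k == m then m + 1 else m) m0 → j ∈ L := by
  induction L with
  | nil =>
    intro m0
    refine ⟨le_refl _, by simp, ?_⟩
    intro j h1 h2
    simp only [List.foldl_nil] at h2
    exact absurd h2 (by omega)
  | cons k rest ih =>
    have hk : ∀ x ∈ rest, k < x := fun x hx => (List.pairwise_cons.mp hL).1 x hx
    have hrest := ih (List.pairwise_cons.mp hL).2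
    intro m0
    simp only [List.foldl_cons]
    by_cases hkm : k = m0
    · subst hkm
      simp only [BEq.rfl, if_pos]
      obtain ⟨h1, h2, h3⟩ := hrest (k + 1)
      refine ⟨by omega, ?_, ?_⟩
      · intro hmem
        rcases List.mem_cons.mp hmem with h | h
        · omega
        · exact h2 h
      · intro j hj1 hj2
        by_cases hjk : j = k
        · subst hjk; exact List.mem_cons_self
        · exact List.mem_cons_of_mem _ (h3 j (by omega) hj2)
    · rw [if_neg (by simpa using hkm)]
      obtain ⟨h1, h2, h3⟩ := hrest m0
      by_cases hlt : k < m0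
      · refine ⟨h1, ?_, ?_⟩
        · intro hmem
          rcases List.mem_cons.mp hmem with h | h
          · omega
          · exact h2 h
        · intro j hj1 hj2
          exact List.mem_cons_of_mem _ (h3 j hj1 hj2)
      · -- k > m0: the fold stays at m0 (otherwise m0 ∈ rest, but rest elements are > k > m0)
        have hgt : m0 < k := by omega
        have heq : rest.foldl (fun m k => if k == m then m + 1 else m) m0 = m0 := by
          by_contra hne
          have : m0 ∈ rest := h3 m0 (le_refl _) (by omega)
          have := hk m0 this
          omega
        rw [heq]
        refine ⟨le_refl _, ?_, ?_⟩
        · intro hmem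
          rcases List.mem_cons.mp hmem with h | h
          · omega
          · have := hk m0 h; omega
        · intro j hj1 hj2; omega

-- ===== VERDICT =====
theorem koncna_povezava_spec : Claim_equal_koncna_povezava := by
  intro z _ hpre
  unfold Spec_koncna_povezava koncna_povezava koncna_povezava_alt
  set keys := PySem.List.sorted (z.map Prod.fst) (fun x => x) false with hkeys
  set cond : Int → Bool := fun k => (((pvLookup z k).getD []).length == 1) with hcond
  -- A = filter over pyRange 1 mA
  set mA := walkEnd z (z.length + 1) 1 with hmA
  have hA : koncna_povezava_loopA z (z.length + 1) 1 [] =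
      (PySem.List.pyRange 1 mA 1).filter cond := by
    simpa using loopA_eq_filter z cond (fun k => rfl) (z.length + 1) 1 []
  rw [hA]
  -- characterizations
  have hfuel : ((z.map Prod.fst).filter (fun k => decide ((1:Int) ≤ k))).length < z.length + 1 := by
    calc ((z.map Prod.fst).filter (fun k => decide ((1:Int) ≤ k))).length
        ≤ (z.map Prod.fst).length := List.length_filter_le _ _
      _ = z.length := by simp
      _ < z.length + 1 := by omega
  obtain ⟨hAnone, hAmem⟩ := walkEnd_spec z (z.length + 1) 1 hfuel
  have hAnotmem : mA ∉ z.map Prod.fst := by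
    intro h
    exact absurd hAnone (by simpa using (lookup_some_iff_mem z mA).mpr h)
  have hA1 : (1 : Int) ≤ mA := walkEnd_ge z (z.length + 1) 1
  -- keys is strictly increasing
  have hperm : keys.Perm (z.map Prod.fst) := PySem.List.sorted_perm _ _ _
  have hmemk : ∀ x, x ∈ keys ↔ x ∈ z.map Prod.fst := fun x => hperm.mem_iff
  have hnodupk : keys.Nodup := hperm.nodup_iff.mpr hpre
  have hsorted : keys.Pairwise (· ≤ ·) := by
    simpa using PySem.List.sorted_pairwise (z.map Prod.fst) (fun x => x)
  have hpwlt : keys.Pairwise (· < ·) := by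
    have hand := hsorted.and hnodupk
    exact hand.imp (fun hab => lt_of_le_of_ne hab.1 hab.2)
  obtain ⟨hB1, hBnotmem, hBmem⟩ := scan_spec keys hpwlt 1
  set mB := keys.foldl (fun m k => if k == m then m + 1 else m) (1 : Int) with hmB
  -- mA = mB
  have hmm : mA = mB := by
    rcases lt_trichotomy mA mB with h | h | h
    · exact absurd ((hmemk mA).mp (hBmem mA hA1 h)) hAnotmem
    · exact h
    · exact absurd ((hmemk mB).mpr (hAmem mB hB1 h)) (fun hc => hBnotmem hc)
  rw [hmm]
  -- both sides are the strictly-increasing list of keys in [1, mB) satisfying cond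
  have hperm2 : ((PySem.List.pyRange 1 mB 1).filter (fun k => decide (1 ≤ k) && decide (k < mB) && cond k)).Perm
      (keys.filter (fun k => decide (1 ≤ k) && decide (k < mB) && cond k)) := by
    apply (List.perm_ext_iff_of_nodup ((PySem.List.nodup_pyRange_one 1 mB).filter _) (hnodupk.filter _)).mpr
    intro x
    simp only [List.mem_filter, PySem.List.mem_pyRange_one, Bool.and_eq_true, decide_eq_true_eq]
    constructor
    · rintro ⟨⟨hx1, hx2⟩, hc⟩
      exact ⟨(hmemk x).mpr (hAmem x hx1 (by rw [← hmA, hmm]; exact hx2)), hc⟩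
    · rintro ⟨_, hc⟩
      exact ⟨⟨hc.1.1, hc.1.2⟩, hc⟩
  have heqF : (PySem.List.pyRange 1 mB 1).filter (fun k => decide (1 ≤ k) && decide (k < mB) && cond k) =
      keys.filter (fun k => decide (1 ≤ k) && decide (k < mB) && cond k) :=
    List.Perm.eq_of_pairwise' (r := (· < ·))
      ((PySem.List.pairwise_lt_pyRange_one 1 mB).sublist List.filter_sublist)
      (hpwlt.sublist List.filter_sublist) hperm2
  have hrange : (PySem.List.pyRange 1 mB 1).filter cond =
      (PySem.List.pyRange 1 mB 1).filter (fun k => decide (1 ≤ k) && decide (k < mB) && cond k) := by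
    apply List.filter_congr
    intro x hx
    have := PySem.List.mem_pyRange_one.mp hx
    simp [this.1, this.2]
  rw [hrange, heqF]
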